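-- pv_equiv track=rewrite | github.com/hepheir/Problem-Solving | 2021 네이버웹툰 개발 챌린지/prob1.py | solution
-- ===== SOURCE A (Python) =====
-- from collections import defaultdict
--
-- def solution(lottery):
--     is_winner = defaultdict(lambda: False)
--     counter = defaultdict(lambda: 0)
--     n_winners = 0
--     n_tries = 0
--
--     for user_id, is_jackpot in lottery:
--         if is_jackpot and not is_winner[user_id]:
--             counter[user_id] += 1
--             is_winner[user_id] = True
--             n_winners += 1
--             n_tries += counter[user_id]
--         elif not is_jackpot and not is_winner[user_id]:
--             counter[user_id] += 1
--
--     if n_winners == 0: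
--         return 0
--     else:
--         return n_tries // n_winners
-- ===== SOURCE B (Python) =====
-- def solution(lottery):
--     groups = {}
--     for user_id, is_jackpot in lottery:
--         groups.setdefault(user_id, []).append(is_jackpot)
--     total = 0
--     winners = 0
--     for flags in groups.values():
--         if True in flags:
--             total += flags.index(True) + 1
--             winners += 1
--     return total // winners if winners else 0
-- ===== Notes on version B (the rewrite author's own statement) =====
-- stated objective: alternative
-- what changed: Instead of A's single pass updating per-user winner/counter dicts plus running totals, B first groups each user's jackpot flags into a dict of lists and then, in a second pass, reads each winner's tries-to-first-jackpot directly as index-of-first-True + 1.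
import Mathlib
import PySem

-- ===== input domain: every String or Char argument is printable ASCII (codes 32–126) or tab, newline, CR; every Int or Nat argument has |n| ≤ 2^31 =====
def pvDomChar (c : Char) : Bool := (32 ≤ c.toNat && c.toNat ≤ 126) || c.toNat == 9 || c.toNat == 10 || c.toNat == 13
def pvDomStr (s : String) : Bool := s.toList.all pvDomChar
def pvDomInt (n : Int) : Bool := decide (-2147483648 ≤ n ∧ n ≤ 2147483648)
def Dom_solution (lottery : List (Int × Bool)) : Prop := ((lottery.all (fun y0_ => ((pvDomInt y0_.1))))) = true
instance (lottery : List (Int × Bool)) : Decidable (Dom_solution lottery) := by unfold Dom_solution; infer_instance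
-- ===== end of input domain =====

-- B groups each user's flags first and reads tries-to-first-jackpot as index-of-first-True + 1,
-- instead of A's inline winner/counter bookkeeping; alternative decomposition, same O(n) cost.

-- ===== PORT A =====
-- one iteration of A's loop over (user_id, is_jackpot); state = (is_winner, counter, n_winners, n_tries).
-- defaultdict reads are ported as getD (the read-inserted default key never affects the returned value).
def solutionStep (st : PySem.Dict Int Bool × PySem.Dict Int Int × Int × Int) (p : Int × Bool) :
    PySem.Dict Int Bool × PySem.Dict Int Int × Int × Int :=
  if p.2 && !(st.1.getD p.1 false) then
    let c := st.2.1.getD p.1 0 + 1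
    (st.1.insert p.1 true, st.2.1.insert p.1 c, st.2.2.1 + 1, st.2.2.2 + c)
  else if !p.2 && !(st.1.getD p.1 false) then
    (st.1, st.2.1.insert p.1 (st.2.1.getD p.1 0 + 1), st.2.2.1, st.2.2.2)
  else st

def solution (lottery : List (Int × Bool)) : Int :=
  let st := List.foldl solutionStep (PySem.Dict.empty, PySem.Dict.empty, (0 : Int), (0 : Int)) lottery
  if st.2.2.1 = 0 then 0 else PySem.Int.floordiv st.2.2.2 st.2.2.1

-- ===== PORT B =====
def solution_alt (lottery : List (Int × Bool)) : Int :=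
  let groups := List.foldl (fun (g : PySem.Dict Int (List Bool)) p => g.modify p.1 [] (fun fs => fs ++ [p.2]))
      PySem.Dict.empty lottery
  let tw := List.foldl (fun (acc : Int × Int) flags =>
      if flags.contains true then
        match PySem.List.index? flags true with
        | some i => (acc.1 + (i : Int) + 1, acc.2 + 1)
        | none => acc          -- unreachable: guarded by `True in flags`
      else acc) ((0 : Int), (0 : Int)) groups.values
  if tw.2 ≠ 0 then PySem.Int.floordiv tw.1 tw.2 else 0

-- ===== PRECONDITION & SPEC =====
def Spec_solution (lottery : List (Int × Bool)) (out : Int) : Prop := out = solution_alt lottery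
instance (lottery : List (Int × Bool)) (out : Int) : Decidable (Spec_solution lottery out) := by unfold Spec_solution; infer_instance

-- ===== CLAIM (what is proved, stated in full; the proofs are below) =====
def Claim_equal_solution : Prop := ∀ (lottery : List (Int × Bool)), Dom_solution lottery → Spec_solution lottery (solution lottery)

-- ===== LEMMAS AND PROOFS =====

-- the flags of user u, in lottery order
def pvFlags (l : List (Int × Bool)) (u : Int) : List Bool := (l.filter (fun p => p.1 == u)).map (·.2)
-- did u ever hit the jackpot
def pvWin (fs : List Bool) : Bool := fs.contains true
-- tries until the first jackpot (0 when there is none)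
def pvScore (fs : List Bool) : Int :=
  match PySem.List.index? fs true with
  | some i => (i : Int) + 1
  | none => 0
-- A's counter value: tries so far, frozen at the first jackpot
def pvCnt (fs : List Bool) : Int := if pvWin fs then pvScore fs else (fs.length : Int)
-- 1 if u is a winner else 0
def pvW01 (fs : List Bool) : Int := if pvWin fs then 1 else 0
-- the distinct users in first-appearance order
def pvUsers (l : List (Int × Bool)) : List Int := PySem.Set.ofList (l.map Prod.fst)
def pvNW (l : List (Int × Bool)) : Int := ((pvUsers l).map (fun u => pvW01 (pvFlags l u))).sum
def pvNT (l : List (Int × Bool)) : Int := ((pvUsers l).map (fun u => pvScore (pvFlags l u))).sum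
def pvStA (l : List (Int × Bool)) : PySem.Dict Int Bool × PySem.Dict Int Int × Int × Int :=
  List.foldl solutionStep (PySem.Dict.empty, PySem.Dict.empty, (0 : Int), (0 : Int)) l

lemma pvStA_append (l : List (Int × Bool)) (p : Int × Bool) :
    pvStA (l ++ [p]) = solutionStep (pvStA l) p := by
  simp [pvStA, List.foldl_append]

lemma pvFlags_append (l : List (Int × Bool)) (p : Int × Bool) (u : Int) :
    pvFlags (l ++ [p]) u = if p.1 = u then pvFlags l u ++ [p.2] else pvFlags l u := by
  by_cases h : p.1 = u <;> simp [pvFlags, List.filter_append, h]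

lemma pvMem_users_iff (l : List (Int × Bool)) (u : Int) : u ∈ pvUsers l ↔ u ∈ l.map Prod.fst :=
  PySem.Set.mem_ofList _ _

lemma pvNodup_users (l : List (Int × Bool)) : (pvUsers l).Nodup := PySem.Set.nodup_ofList _

lemma pvFlags_nil_of_not_mem (l : List (Int × Bool)) (u : Int) (h : u ∉ pvUsers l) :
    pvFlags l u = [] := by
  rw [pvMem_users_iff] at h
  simp only [pvFlags, List.map_eq_nil_iff, List.filter_eq_nil_iff]
  intro p hp hbeq
  exact h (List.mem_map.mpr ⟨p, hp, by simpa using hbeq⟩)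

lemma pvUsers_append (l : List (Int × Bool)) (p : Int × Bool) :
    pvUsers (l ++ [p]) = if p.1 ∈ pvUsers l then pvUsers l else pvUsers l ++ [p.1] := by
  simp only [pvUsers, List.map_append, List.map_cons, List.map_nil,
    PySem.Set.ofList_append_singleton, PySem.Set.add]
  by_cases h : p.1 ∈ PySem.Set.ofList (l.map Prod.fst) <;> simp [h]

lemma pvWin_append (fs : List Bool) (b : Bool) : pvWin (fs ++ [b]) = (pvWin fs || b) := by
  cases b <;> simp [pvWin]

lemma pvScore_of_not_win (fs : List Bool) (h : pvWin fs = false) : pvScore fs = 0 := by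
  have hn : PySem.List.index? fs true = none :=
    (PySem.List.index?_eq_none_iff fs true).mpr (by simpa [pvWin] using h)
  unfold pvScore
  rw [hn]

lemma pvScore_append_of_win (fs gs : List Bool) (h : pvWin fs = true) :
    pvScore (fs ++ gs) = pvScore fs := by
  have hmem : true ∈ fs := by simpa [pvWin] using h
  induction fs with
  | nil => simp at hmem
  | cons a t ih =>
    cases a with
    | true => simp [pvScore, PySem.List.index?, List.idxOf?_cons]
    | false =>
      have hmem' : true ∈ t := by simpa using hmem
      have := ih (by simpa [pvWin] using hmem') hmem'
      simp only [pvScore, PySem.List.index?, List.cons_append, List.idxOf?_cons] at *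
      obtain ⟨i, hi⟩ : ∃ i, List.idxOf? true (t ++ gs) = some i := by
        cases hh : List.idxOf? true (t ++ gs) with
        | none =>
          exact absurd ((PySem.List.index?_eq_none_iff (t ++ gs) true).mp hh)
            (by simp [List.mem_append, hmem'])
        | some i => exact ⟨i, rfl⟩
      obtain ⟨j, hj⟩ : ∃ j, List.idxOf? true t = some j := by
        cases hh : List.idxOf? true t with
        | none => exact absurd ((PySem.List.index?_eq_none_iff t true).mp hh) (by simp [hmem'])
        | some j => exact ⟨j, rfl⟩
      simp [hi, hj] at this ⊢
      omega

lemma pvScore_append_true_of_not_win (fs : List Bool) (h : pvWin fs = false) :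
    pvScore (fs ++ [true]) = (fs.length : Int) + 1 := by
  induction fs with
  | nil => simp [pvScore, PySem.List.index?, List.idxOf?_cons]
  | cons a t ih =>
    cases a with
    | true => simp [pvWin] at h
    | false =>
      have ht : pvWin t = false := by simpa [pvWin] using h
      have := ih ht
      simp only [pvScore, PySem.List.index?, List.cons_append, List.idxOf?_cons] at this ⊢
      obtain ⟨i, hi⟩ : ∃ i, List.idxOf? true (t ++ [true]) = some i := by
        cases hh : List.idxOf? true (t ++ [true]) with
        | none =>
          exact absurd ((PySem.List.index?_eq_none_iff (t ++ [true]) true).mp hh) (by simp)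
        | some i => exact ⟨i, rfl⟩
      simp [hi] at this ⊢
      omega

lemma pv_sum_update (xs : List Int) (hnd : xs.Nodup) (u : Int) (hu : u ∈ xs)
    (f g : Int → Int) (h : ∀ v ∈ xs, v ≠ u → f v = g v) :
    (xs.map f).sum = (xs.map g).sum + (f u - g u) := by
  induction xs with
  | nil => simp at hu
  | cons a t ih =>
    rw [List.map_cons, List.map_cons, List.sum_cons, List.sum_cons]
    by_cases hau : a = u
    · subst hau
      have hnt : a ∉ t := (List.nodup_cons.mp hnd).1
      have ht : t.map f = t.map g :=
        List.map_congr_left (fun v hv =>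
          h v (List.mem_cons_of_mem _ hv) (fun hvu : v = a => hnt (hvu ▸ hv)))
      rw [ht]; ring
    · have hut : u ∈ t := by
        rcases List.mem_cons.mp hu with h1 | h1
        · exact absurd h1.symm hau
        · exact h1
      have ha : f a = g a := h a (by simp) hau
      rw [ha, ih (List.nodup_cons.mp hnd).2 hut
        (fun v hv hvu => h v (List.mem_cons_of_mem _ hv) hvu)]
      ring

-- how each per-user sum changes when one entry is appended
lemma pv_sum_step (l : List (Int × Bool)) (p : Int × Bool) (F : List Bool → Int) (hF0 : F [] = 0) :
    ((pvUsers (l ++ [p])).map (fun u => F (pvFlags (l ++ [p]) u))).sum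
      = ((pvUsers l).map (fun u => F (pvFlags l u))).sum
        + (F (pvFlags l p.1 ++ [p.2]) - F (pvFlags l p.1)) := by
  rw [pvUsers_append]
  by_cases hm : p.1 ∈ pvUsers l
  · rw [if_pos hm]
    have h2 := pv_sum_update (pvUsers l) (pvNodup_users l) p.1 hm
      (fun u => F (pvFlags (l ++ [p]) u)) (fun u => F (pvFlags l u))
      (fun v _ hvu => by
        show F (pvFlags (l ++ [p]) v) = F (pvFlags l v)
        rw [pvFlags_append]
        exact congrArg F (if_neg (fun hh : p.1 = v => hvu hh.symm)))
    beta_reduce at h2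
    rw [h2, pvFlags_append, if_pos rfl]
  · rw [if_neg hm]
    have hnil : pvFlags l p.1 = [] := pvFlags_nil_of_not_mem l p.1 hm
    rw [List.map_append, List.sum_append]
    have hcong : (pvUsers l).map (fun u => F (pvFlags (l ++ [p]) u))
        = (pvUsers l).map (fun u => F (pvFlags l u)) :=
      List.map_congr_left (fun v hv => by
        show F (pvFlags (l ++ [p]) v) = F (pvFlags l v)
        rw [pvFlags_append]
        exact congrArg F (if_neg (fun hh : p.1 = v => hm (hh ▸ hv))))
    rw [hcong]
    have hlast : pvFlags (l ++ [p]) p.1 = pvFlags l p.1 ++ [p.2] := by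
      rw [pvFlags_append, if_pos rfl]
    simp [hlast, hnil, hF0]

-- A's loop invariant
lemma pvA_inv (l : List (Int × Bool)) :
    (∀ u, (pvStA l).1.getD u false = pvWin (pvFlags l u)) ∧
    (∀ u, (pvStA l).2.1.getD u 0 = pvCnt (pvFlags l u)) ∧
    (pvStA l).2.2.1 = pvNW l ∧
    (pvStA l).2.2.2 = pvNT l := by
  induction l using List.reverseRecOn with
  | nil =>
    refine ⟨fun u => ?_, fun u => ?_, ?_, ?_⟩ <;>
      simp [pvStA, pvFlags, pvWin, pvCnt, pvNW, pvNT, pvUsers, pvW01, PySem.Set.ofList]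
  | append_singleton l p ih =>
    obtain ⟨ihW, ihC, ihNW, ihNT⟩ := ih
    obtain ⟨u0, j⟩ := p
    have hNWs := pv_sum_step l (u0, j) pvW01 (by simp [pvW01, pvWin])
    have hNTs := pv_sum_step l (u0, j) pvScore (by unfold pvScore; simp [PySem.List.index?])
    rw [pvStA_append]
    cases hwin : pvWin (pvFlags l u0) with
    | true =>
      have hstep : solutionStep (pvStA l) (u0, j) = pvStA l := by
        simp [solutionStep, ihW u0, hwin]
      rw [hstep]
      refine ⟨fun u => ?_, fun u => ?_, ?_, ?_⟩
      · rw [ihW u, pvFlags_append]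
        by_cases h : u0 = u
        · subst h; rw [if_pos rfl, pvWin_append, hwin]; simp
        · rw [if_neg h]
      · rw [ihC u, pvFlags_append]
        by_cases h : u0 = u
        · subst h; rw [if_pos rfl]
          have h1 : pvWin (pvFlags l u0 ++ [j]) = true := by
            rw [pvWin_append, hwin]; simp
          simp [pvCnt, h1, hwin, pvScore_append_of_win (pvFlags l u0) [j] hwin]
        · rw [if_neg h]
      · rw [ihNW]; show pvNW l = pvNW (l ++ [(u0, j)])
        unfold pvNW; rw [hNWs]
        have h01 : pvW01 (pvFlags l u0 ++ [j]) = pvW01 (pvFlags l u0) := by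
          simp [pvW01, pvWin_append, hwin]
        simp [h01]
      · rw [ihNT]; show pvNT l = pvNT (l ++ [(u0, j)])
        unfold pvNT; rw [hNTs]
        simp [pvScore_append_of_win (pvFlags l u0) [j] hwin]
    | false =>
      have hcnt : (pvStA l).2.1.getD u0 0 = ((pvFlags l u0).length : Int) := by
        rw [ihC u0, pvCnt, hwin]; simp
      cases j with
      | true =>
        have hstep : solutionStep (pvStA l) (u0, true)
            = ((pvStA l).1.insert u0 true,
               (pvStA l).2.1.insert u0 (((pvFlags l u0).length : Int) + 1),
               (pvStA l).2.2.1 + 1, (pvStA l).2.2.2 + (((pvFlags l u0).length : Int) + 1)) := by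
          simp [solutionStep, ihW u0, hwin, hcnt]
        rw [hstep]
        refine ⟨fun u => ?_, fun u => ?_, ?_, ?_⟩
        · show ((pvStA l).1.insert u0 true).getD u false = pvWin (pvFlags (l ++ [(u0, true)]) u)
          rw [pvFlags_append]
          by_cases h : u0 = u
          · subst h
            rw [if_pos rfl, PySem.Dict.getD_insert_self, pvWin_append, hwin]; simp
          · rw [if_neg h, PySem.Dict.getD_insert, if_neg (fun hh : u = u0 => h hh.symm), ihW u]
        · show ((pvStA l).2.1.insert u0 (((pvFlags l u0).length : Int) + 1)).getD u 0
            = pvCnt (pvFlags (l ++ [(u0, true)]) u)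
          rw [pvFlags_append]
          by_cases h : u0 = u
          · subst h
            rw [if_pos rfl, PySem.Dict.getD_insert_self]
            have h1 : pvWin (pvFlags l u0 ++ [true]) = true := by
              rw [pvWin_append, hwin]; simp
            simp [pvCnt, h1, pvScore_append_true_of_not_win (pvFlags l u0) hwin]
          · rw [if_neg h, PySem.Dict.getD_insert, if_neg (fun hh : u = u0 => h hh.symm), ihC u]
        · show (pvStA l).2.2.1 + 1 = pvNW (l ++ [(u0, true)])
          rw [ihNW]
          unfold pvNW; rw [hNWs]
          have ha : pvW01 (pvFlags l u0 ++ [true]) = 1 := by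
            have : pvWin (pvFlags l u0 ++ [true]) = true := by rw [pvWin_append, hwin]; simp
            simp [pvW01, this]
          have hb : pvW01 (pvFlags l u0) = 0 := by simp [pvW01, hwin]
          rw [ha, hb]; ring
        · show (pvStA l).2.2.2 + (((pvFlags l u0).length : Int) + 1) = pvNT (l ++ [(u0, true)])
          rw [ihNT]
          unfold pvNT; rw [hNTs]
          rw [pvScore_append_true_of_not_win (pvFlags l u0) hwin,
            pvScore_of_not_win (pvFlags l u0) hwin]
          ring
      | false =>
        have hstep : solutionStep (pvStA l) (u0, false)
            = ((pvStA l).1, (pvStA l).2.1.insert u0 (((pvFlags l u0).length : Int) + 1),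
               (pvStA l).2.2.1, (pvStA l).2.2.2) := by
          simp [solutionStep, ihW u0, hwin, hcnt]
        rw [hstep]
        refine ⟨fun u => ?_, fun u => ?_, ?_, ?_⟩
        · show (pvStA l).1.getD u false = pvWin (pvFlags (l ++ [(u0, false)]) u)
          rw [ihW u, pvFlags_append]
          by_cases h : u0 = u
          · subst h; rw [if_pos rfl, pvWin_append, hwin]; simp
          · rw [if_neg h]
        · show ((pvStA l).2.1.insert u0 (((pvFlags l u0).length : Int) + 1)).getD u 0
            = pvCnt (pvFlags (l ++ [(u0, false)]) u)
          rw [pvFlags_append]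
          by_cases h : u0 = u
          · subst h
            rw [if_pos rfl, PySem.Dict.getD_insert_self]
            have h1 : pvWin (pvFlags l u0 ++ [false]) = false := by
              rw [pvWin_append, hwin]; simp
            simp [pvCnt, h1]
          · rw [if_neg h, PySem.Dict.getD_insert, if_neg (fun hh : u = u0 => h hh.symm), ihC u]
        · show (pvStA l).2.2.1 = pvNW (l ++ [(u0, false)])
          rw [ihNW]
          unfold pvNW; rw [hNWs]
          have h01 : pvW01 (pvFlags l u0 ++ [false]) = pvW01 (pvFlags l u0) := by
            simp [pvW01, pvWin_append, hwin]
          simp [h01]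
        · show (pvStA l).2.2.2 = pvNT (l ++ [(u0, false)])
          rw [ihNT]
          unfold pvNT; rw [hNTs]
          rw [pvScore_of_not_win (pvFlags l u0 ++ [false]) (by rw [pvWin_append, hwin]; simp),
            pvScore_of_not_win (pvFlags l u0) hwin]
          ring

-- B's second pass as two sums
lemma pvFoldB (vs : List (List Bool)) (a b : Int) :
    List.foldl (fun (acc : Int × Int) flags =>
      if flags.contains true then
        match PySem.List.index? flags true with
        | some i => (acc.1 + (i : Int) + 1, acc.2 + 1)
        | none => acc
      else acc) (a, b) vs
    = (a + (vs.map pvScore).sum, b + (vs.map pvW01).sum) := by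
  induction vs generalizing a b with
  | nil => simp
  | cons fs t ih =>
    simp only [List.foldl_cons, List.map_cons, List.sum_cons]
    cases hc : fs.contains true with
    | false =>
      have hw : pvWin fs = false := by simpa [pvWin] using hc
      rw [if_neg (by simp [hc])]
      rw [ih, pvScore_of_not_win fs hw]
      have h01 : pvW01 fs = 0 := by simp [pvW01, hw]
      rw [h01]
      simp
    | true =>
      obtain ⟨i, hi⟩ : ∃ i, PySem.List.index? fs true = some i := by
        cases hh : PySem.List.index? fs true with
        | none =>
          exact absurd ((PySem.List.index?_eq_none_iff fs true).mp hh) (by simp_all)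
        | some i => exact ⟨i, rfl⟩
      rw [if_pos (by simp [hc]), hi, ih]
      have hsc : pvScore fs = (i : Int) + 1 := by unfold pvScore; rw [hi]
      have hmem : true ∈ fs := by simpa using hc
      have h01 : pvW01 fs = 1 := by simp [pvW01, pvWin, hmem]
      rw [hsc, h01, Prod.mk.injEq]
      exact ⟨by ring, by ring⟩

lemma pvB_char (l : List (Int × Bool)) :
    solution_alt l = if pvNW l ≠ 0 then PySem.Int.floordiv (pvNT l) (pvNW l) else 0 := by
  simp only [solution_alt]
  set g := List.foldl (fun (g : PySem.Dict Int (List Bool)) p => g.modify p.1 [] (fun fs => fs ++ [p.2]))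
      PySem.Dict.empty l with hg
  have hkeys : g.keys = pvUsers l := by
    have h1 := PySem.Dict.keys_foldl_modify_key l Prod.fst ([] : List Bool)
      (fun _ p => (fun fs => fs ++ [p.2])) PySem.Dict.empty
    rw [hg]
    refine h1.trans ?_
    rw [PySem.Dict.keys_empty, PySem.Set.update_nil_left]
    rfl
  have hnodup : g.keys.Nodup := by rw [hkeys]; exact pvNodup_users l
  have hvals : g.values = (pvUsers l).map (fun k => pvFlags l k) := by
    rw [PySem.Dict.values_eq_map_keys g hnodup ([] : List Bool), hkeys]
    refine List.map_congr_left (fun k _ => ?_)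
    have h2 := PySem.Dict.getD_foldl_modify_append l PySem.Dict.empty k
    rw [hg]
    refine h2.trans ?_
    rw [PySem.Dict.getD_empty]
    rfl
  rw [hvals, pvFoldB, List.map_map, List.map_map]
  simp [pvNW, pvNT, Function.comp_def]

-- ===== VERDICT (by name: the statement is the Claim_ definition above) =====
theorem solution_spec : Claim_equal_solution := by
  intro l _
  unfold Spec_solution
  rw [pvB_char]
  show (if (pvStA l).2.2.1 = 0 then (0 : Int)
      else PySem.Int.floordiv (pvStA l).2.2.2 (pvStA l).2.2.1) = _
  obtain ⟨-, -, hNW, hNT⟩ := pvA_inv l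
  rw [hNW, hNT]
  by_cases h : pvNW l = 0 <;> simp [h]
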